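-- pv_equiv track=rewrite | github.com/nsfcac/MonSter | mbuilder/mb_utils.py | get_jobs_cpus
-- ===== SOURCE A (Python) =====
-- def get_jobs_cpus(row, item):
--     jobs = []
--     cpus = []
--     jobs_cpus_map = {}
--
--     if row['jobs_copy']:
--         for job_list, cpu_list in zip(row['jobs_copy'], row['cpus']):
--             for i, job in enumerate(job_list):
--                 if job not in jobs_cpus_map:
--                     jobs_cpus_map[job] = cpu_list[i]
--
--         # Order the dictionary by key
--         jobs_cpus_map = dict(sorted(jobs_cpus_map.items()))
--
--         jobs = list(jobs_cpus_map.keys())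
--         cpus = list(jobs_cpus_map.values())
--
--     if item == 'jobs':
--         return jobs
--     elif item == 'cpus':
--         return cpus
--     else:
--         return None
-- ===== SOURCE B (Python) =====
-- def get_jobs_cpus(row, item):
--     pairs = []
--     jc = row['jobs_copy']
--     if jc:
--         for job_list, cpu_list in zip(jc, row['cpus']):
--             pairs += [(job, cpu_list[i]) for i, job in enumerate(job_list)]
--         pairs.sort(key=lambda p: p[0])
--         out = []
--         for p in pairs:
--             if not out or p[0] != out[-1][0]:
--                 out.append(p)
--         pairs = out
--     if item == 'jobs':
--         return [p[0] for p in pairs]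
--     if item == 'cpus':
--         return [p[1] for p in pairs]
--     return None
-- ===== Notes on version B (the rewrite author's own statement) =====
-- stated objective: alternative
-- what changed: Replaces A's insert-if-absent dict plus sorted(items) with a flat (job,cpu) pair list that is stable-sorted by job and then deduplicated in one adjacent-scan pass (sort stability keeps the first-occurrence cpu), with an early return for items other than 'jobs'/'cpus'.
-- outside the precondition, e.g. on get_jobs_cpus({'jobs_copy': [[1, 1]], 'cpus': [[5]]}, 'jobs'): A returns [1], B raises IndexError
import Mathlib
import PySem

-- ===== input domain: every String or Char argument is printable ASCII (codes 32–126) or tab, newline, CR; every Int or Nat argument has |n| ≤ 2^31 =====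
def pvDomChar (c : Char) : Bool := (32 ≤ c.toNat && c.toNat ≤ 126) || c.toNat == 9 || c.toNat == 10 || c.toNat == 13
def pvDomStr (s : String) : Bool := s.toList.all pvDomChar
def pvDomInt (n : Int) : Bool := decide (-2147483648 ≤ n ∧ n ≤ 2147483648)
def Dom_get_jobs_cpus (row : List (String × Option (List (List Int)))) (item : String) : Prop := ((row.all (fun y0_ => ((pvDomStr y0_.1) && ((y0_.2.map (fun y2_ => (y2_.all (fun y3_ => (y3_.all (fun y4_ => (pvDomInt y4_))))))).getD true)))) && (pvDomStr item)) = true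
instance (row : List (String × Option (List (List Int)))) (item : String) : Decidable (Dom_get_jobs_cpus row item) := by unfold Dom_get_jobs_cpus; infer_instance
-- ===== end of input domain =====

-- B replaces A's insert-if-absent dict + sorted(items) with a flat pair list, one stable sort by job,
-- and one adjacent-dedup scan (objective: alternative decomposition, same asymptotic cost).

-- ===== PORT A =====
-- final 'if item == jobs / elif cpus / else None' dispatch of A
def pvTailA (jobs cpus : List Int) (item : String) : Option (List Int) :=
  if item = "jobs" then some jobs else if item = "cpus" then some cpus else none

def get_jobs_cpus (row : List (String × Option (List (List Int)))) (item : String) : Option (List Int) :=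
  match (PySem.Dict.mk row).get? "jobs_copy" with
  | none => none           -- KeyError('jobs_copy'): excluded by Pre_
  | some jcv =>
    match jcv with
    | none => pvTailA [] [] item        -- row['jobs_copy'] is None: falsy, loop skipped
    | some jc =>
      if jc.isEmpty then pvTailA [] [] item   -- empty list: falsy, loop skipped
      else
        match (PySem.Dict.mk row).get? "cpus" with
        | some (some cp) =>
          let m : PySem.Dict Int Int :=
            (jc.zip cp).foldl
              (fun m pr =>
                (PySem.List.enumerate pr.1).foldl
                  (fun m iv => if m.contains iv.2 then m else m.insert iv.2 (PySem.List.pyGetD pr.2 iv.1 0)) m)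
              PySem.Dict.empty
          let its := PySem.List.sorted2 m.items (fun p => p.1) (fun p => p.2)
          pvTailA (its.map (fun p => p.1)) (its.map (fun p => p.2)) item
        | _ => none        -- KeyError('cpus') / zip over None (TypeError): excluded by Pre_

-- ===== PORT B =====
-- loop body of Source B's dedup scan: 'if not out or p[0] != out[-1][0]: out.append(p)'
def pvDdStep (out : List (Int × Int)) (p : Int × Int) : List (Int × Int) :=
  match out.getLast? with
  | none => out ++ [p]
  | some q => if p.1 ≠ q.1 then out ++ [p] else out

def get_jobs_cpus_alt (row : List (String × Option (List (List Int)))) (item : String) : Option (List Int) :=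
  ((PySem.Dict.mk row).get? "jobs_copy").elim
    none                 -- KeyError('jobs_copy'): excluded by Pre_
    (fun jcv =>
      let pairs : List (Int × Int) :=
        jcv.elim [] (fun jc =>
          if jc.isEmpty then []
          else
            -- 'cpus' absent or None (KeyError/TypeError): excluded by Pre_
            ((PySem.Dict.mk row).get? "cpus").join.elim [] (fun cp =>
              let ps := (jc.zip cp).foldl
                (fun acc pr => acc ++ (PySem.List.enumerate pr.1).map
                    (fun iv => (iv.2, PySem.List.pyGetD pr.2 iv.1 0))) []
              (PySem.List.sorted ps (fun p => p.1)).foldl pvDdStep []))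
      if item = "jobs" then some (pairs.map (fun p => p.1))
      else if item = "cpus" then some (pairs.map (fun p => p.2))
      else none)

-- ===== PRECONDITION & SPEC =====
-- Pre_ excludes inputs where Python A raises: row without key 'jobs_copy' (KeyError); a truthy
-- jobs_copy with 'cpus' missing or None (KeyError/TypeError); and a zipped job_list longer than its
-- cpu_list (IndexError).  The last clause is slightly stronger than A's exact raise condition: when
-- every over-long position holds only a duplicate job, A skips the cpu_list[i] access and returns,
-- while B (which collects every pair first) raises there — see the cite in claim.json.
def pvPreB (row : List (String × Option (List (List Int)))) : Bool :=
  ((PySem.Dict.mk row).get? "jobs_copy").elim false (fun jcv =>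
    jcv.elim true (fun jc =>
      jc.isEmpty ||
        ((PySem.Dict.mk row).get? "cpus").join.elim false (fun cp =>
          (jc.zip cp).all (fun pr => pr.1.length ≤ pr.2.length))))

def Pre_get_jobs_cpus (row : List (String × Option (List (List Int)))) (item : String) : Prop :=
  pvPreB row = true
instance (row : List (String × Option (List (List Int)))) (item : String) : Decidable (Pre_get_jobs_cpus row item) := by unfold Pre_get_jobs_cpus; infer_instance

def pvWitness_get_jobs_cpus : (List (String × Option (List (List Int)))) × String :=
  ([("jobs_copy", some [[3, 1], [1]]), ("cpus", some [[10, 20], [30]])], "jobs")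

def Spec_get_jobs_cpus (row : List (String × Option (List (List Int)))) (item : String) (out : Option (List Int)) : Prop := out = get_jobs_cpus_alt row item
instance (row : List (String × Option (List (List Int)))) (item : String) (out : Option (List Int)) : Decidable (Spec_get_jobs_cpus row item out) := by unfold Spec_get_jobs_cpus; infer_instance

-- ===== CLAIM (what is proved, stated in full; the proofs are below) =====
def Claim_equal_get_jobs_cpus : Prop := ∀ (row : List (String × Option (List (List Int)))) (item : String), Dom_get_jobs_cpus row item → Pre_get_jobs_cpus row item → Spec_get_jobs_cpus row item (get_jobs_cpus row item)

-- ===== LEMMAS AND PROOFS =====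

-- the flattened (job, cpu) pair list both programs traverse
def pvPairs (zs : List (List Int × List Int)) : List (Int × Int) :=
  zs.flatMap (fun pr => (PySem.List.enumerate pr.1).map (fun iv => (iv.2, PySem.List.pyGetD pr.2 iv.1 0)))

-- A's dict step, on items lists
def pvDfStep (acc : List (Int × Int)) (p : Int × Int) : List (Int × Int) :=
  if p.1 ∈ acc.map Prod.fst then acc else acc ++ [p]

-- first value stored under key j (Python's first-occurrence rule)
def pvFirstVal (j : Int) : List (Int × Int) → Option Int
  | [] => none
  | p :: t => if p.1 = j then some p.2 else pvFirstVal j t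

-- structural form of B's dedup scan after its first element
def pvDdAux (prev : Int) : List (Int × Int) → List (Int × Int)
  | [] => []
  | p :: t => if p.1 = prev then pvDdAux prev t else p :: pvDdAux p.1 t

theorem pvNestA (zs : List (List Int × List Int)) (d : PySem.Dict Int Int) :
    zs.foldl
      (fun m pr =>
        (PySem.List.enumerate pr.1).foldl
          (fun m iv => if m.contains iv.2 then m else m.insert iv.2 (PySem.List.pyGetD pr.2 iv.1 0)) m)
      d
    = (pvPairs zs).foldl (fun m p => if m.contains p.1 then m else m.insert p.1 p.2) d := by
  induction zs generalizing d with
  | nil => rfl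
  | cons pr t ih =>
    simp only [List.foldl_cons, pvPairs, List.flatMap_cons, List.foldl_append, List.foldl_map]
    rw [ih]
    rfl

theorem pvNestB (zs : List (List Int × List Int)) :
    zs.foldl
      (fun acc pr => acc ++ (PySem.List.enumerate pr.1).map
          (fun iv => (iv.2, PySem.List.pyGetD pr.2 iv.1 0))) []
    = pvPairs zs := by
  simpa [pvPairs] using
    PySem.List.foldl_append_eq_flatMap
      (fun pr => (PySem.List.enumerate pr.1).map (fun iv => (iv.2, PySem.List.pyGetD pr.2 iv.1 0))) zs []

theorem pvDictItems (P : List (Int × Int)) : ∀ (d : PySem.Dict Int Int),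
    (P.foldl (fun m p => if m.contains p.1 then m else m.insert p.1 p.2) d).items
    = P.foldl pvDfStep d.items := by
  induction P with
  | nil => intro d; rfl
  | cons p t ih =>
    intro d
    simp only [List.foldl_cons]
    by_cases h : p.1 ∈ d.items.map Prod.fst
    · have hc : d.contains p.1 = true := by
        simp only [PySem.Dict.contains, List.any_eq_true]
        obtain ⟨q, hq, hq1⟩ := List.mem_map.mp h
        exact ⟨q, hq, by simp [hq1]⟩
      rw [hc, if_pos rfl, ih d]
      simp only [pvDfStep, if_pos h]
    · have hc : d.contains p.1 = false := by
        simp only [PySem.Dict.contains, List.any_eq_false]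
        intro q hq
        simp only [beq_iff_eq]
        exact fun he => h (List.mem_map.mpr ⟨q, hq, he⟩)
      rw [hc, if_neg (by simp)]
      rw [ih]
      have : (d.insert p.1 p.2).items = d.items ++ [p] := by
        simpa using PySem.Dict.items_insert_of_not_contains d p.2 hc
      rw [this]
      simp only [pvDfStep, if_neg h]

theorem pvFirstVal_mem {j : Int} {c : Int} : ∀ {S : List (Int × Int)},
    pvFirstVal j S = some c → (j, c) ∈ S := by
  intro S
  induction S with
  | nil => intro h; simp [pvFirstVal] at h
  | cons p t ih =>
    intro h
    by_cases hp : p.1 = j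
    · simp only [pvFirstVal, if_pos hp] at h
      injection h with h2
      exact List.mem_cons.mpr (Or.inl (Prod.ext hp.symm h2.symm))
    · simp only [pvFirstVal, if_neg hp] at h
      exact List.mem_cons_of_mem _ (ih h)

theorem pvDfMem (P : List (Int × Int)) : ∀ (acc : List (Int × Int)) (x : Int × Int),
    x ∈ P.foldl pvDfStep acc ↔ x ∈ acc ∨ (x.1 ∉ acc.map Prod.fst ∧ pvFirstVal x.1 P = some x.2) := by
  induction P with
  | nil => intro acc x; simp [pvFirstVal]
  | cons p t ih =>
    intro acc x
    have hfv : pvFirstVal x.1 (p :: t) = if p.1 = x.1 then some p.2 else pvFirstVal x.1 t := rfl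
    simp only [List.foldl_cons, pvDfStep, hfv]
    by_cases h : p.1 ∈ acc.map Prod.fst
    · rw [if_pos h, ih]
      by_cases hx : p.1 = x.1
      · rw [if_pos hx]
        constructor
        · rintro (hm | ⟨hk, _⟩)
          · exact Or.inl hm
          · exact absurd (hx ▸ h) hk
        · rintro (hm | ⟨hk, _⟩)
          · exact Or.inl hm
          · exact absurd (hx ▸ h) hk
      · rw [if_neg hx]
    · rw [if_neg h, ih]
      by_cases hx : p.1 = x.1
      · rw [if_pos hx]
        constructor
        · rintro (hm | ⟨hk, hv⟩)
          · rcases List.mem_append.mp hm with hm | hm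
            · exact Or.inl hm
            · have hxp : x = p := List.mem_singleton.mp hm
              exact Or.inr ⟨hx ▸ h, by rw [hxp]⟩
          · exfalso
            apply hk
            rw [List.map_append]
            exact List.mem_append.mpr (Or.inr (by simp [hx.symm]))
        · rintro (hm | ⟨hk, hv⟩)
          · exact Or.inl (List.mem_append.mpr (Or.inl hm))
          · injection hv with hv2
            exact Or.inl (List.mem_append.mpr (Or.inr (List.mem_singleton.mpr
              (Prod.ext hx.symm hv2.symm))))
      · rw [if_neg hx]
        constructor
        · rintro (hm | ⟨hk, hv⟩)
          · rcases List.mem_append.mp hm with hm | hm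
            · exact Or.inl hm
            · exact absurd (congrArg Prod.fst (List.mem_singleton.mp hm)).symm hx
          · refine Or.inr ⟨fun hmem => hk ?_, hv⟩
            rw [List.map_append]
            exact List.mem_append.mpr (Or.inl hmem)
        · rintro (hm | ⟨hk, hv⟩)
          · exact Or.inl (List.mem_append.mpr (Or.inl hm))
          · refine Or.inr ⟨?_, hv⟩
            rw [List.map_append]
            intro hmem
            rcases List.mem_append.mp hmem with hmem | hmem
            · exact hk hmem
            · have hxy : x.1 = p.1 := by simpa using hmem
              exact hx hxy.symm

theorem pvDfNodup (P : List (Int × Int)) : ∀ (acc : List (Int × Int)),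
    ((acc.map Prod.fst).Nodup) → (((P.foldl pvDfStep acc).map Prod.fst).Nodup) := by
  induction P with
  | nil => intro acc h; exact h
  | cons p t ih =>
    intro acc h
    simp only [List.foldl_cons, pvDfStep]
    by_cases hm : p.1 ∈ acc.map Prod.fst
    · rw [if_pos hm]; exact ih acc h
    · rw [if_neg hm]
      refine ih _ ?_
      simp only [List.map_append, List.map_cons, List.map_nil]
      exact List.Nodup.append h (List.nodup_singleton _) (by
        intro a ha hb
        simp only [List.mem_singleton] at hb
        exact hm (hb ▸ ha))

theorem pvInsertByCongr (b1 b2 : (Int × Int) → (Int × Int) → Bool) (x : Int × Int) :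
    ∀ (ys : List (Int × Int)), (∀ y ∈ ys, b1 x y = b2 x y) →
    PySem.List.insertBy b1 x ys = PySem.List.insertBy b2 x ys := by
  intro ys
  induction ys with
  | nil => intro _; rfl
  | cons y t ih =>
    intro h
    simp only [PySem.List.insertBy]
    rw [h y (by simp)]
    by_cases hb : b2 x y = true
    · simp [hb]
    · simp only [Bool.not_eq_true] at hb
      simp [hb, ih (fun z hz => h z (by simp [hz]))]

theorem pvFoldlInsertByCongr (b1 b2 : (Int × Int) → (Int × Int) → Bool) :
    ∀ (xs acc : List (Int × Int)),
    (∀ a ∈ xs, ∀ c ∈ xs, b1 a c = b2 a c) → (∀ a ∈ xs, ∀ y ∈ acc, b1 a y = b2 a y) →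
    xs.foldl (fun acc x => PySem.List.insertBy b1 x acc) acc
      = xs.foldl (fun acc x => PySem.List.insertBy b2 x acc) acc := by
  intro xs
  induction xs with
  | nil => intro acc _ _; rfl
  | cons x t ih =>
    intro acc hxs hacc
    simp only [List.foldl_cons]
    rw [pvInsertByCongr b1 b2 x acc (fun y hy => hacc x (by simp) y hy)]
    exact ih _ (fun a ha c hc => hxs a (by simp [ha]) c (by simp [hc]))
      (fun a ha y hy => by
        rcases (PySem.List.insertBy_mem_iff b2 x y acc).mp hy with h | h
        · exact h ▸ hxs a (by simp [ha]) x (by simp)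
        · exact hacc a (by simp [ha]) y h)

theorem pvSorted2EqSorted (xs : List (Int × Int)) (h : (xs.map Prod.fst).Nodup) :
    PySem.List.sorted2 xs (fun p => p.1) (fun p => p.2) = PySem.List.sorted xs (fun p => p.1) := by
  rw [PySem.List.sorted_eq_foldl_insertBy]
  show xs.foldl (fun acc x => PySem.List.insertBy
      (fun a b => decide (a.1 < b.1) || (!decide (b.1 < a.1) && decide (a.2 < b.2))) x acc) []
    = _
  apply pvFoldlInsertByCongr
  · intro a ha c hc
    by_cases hac : a = c
    · subst hac; simp
    · have : a.1 ≠ c.1 := fun he => hac (List.inj_on_of_nodup_map h ha hc he)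
      rcases lt_trichotomy a.1 c.1 with hlt | heq | hgt
      · simp [hlt, not_lt_of_gt hlt]
      · exact absurd heq this
      · simp [hgt, not_lt_of_gt hgt]
  · intro a _ y hy
    simp at hy

theorem pvFilterInsertBy (j : Int) (x : Int × Int) :
    ∀ (acc : List (Int × Int)), acc.Pairwise (fun a b => a.1 ≤ b.1) →
    (PySem.List.insertBy (fun a b => decide (a.1 < b.1)) x acc).filter (fun y => decide (y.1 = j))
    = if x.1 = j then acc.filter (fun y => decide (y.1 = j)) ++ [x]
      else acc.filter (fun y => decide (y.1 = j)) := by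
  intro acc
  induction acc with
  | nil =>
    intro _
    by_cases hx : x.1 = j <;> simp [PySem.List.insertBy, List.filter, hx]
  | cons y t ih =>
    intro hp
    simp only [PySem.List.insertBy]
    by_cases hb : x.1 < y.1
    · rw [if_pos (by simpa using hb)]
      by_cases hx : x.1 = j
      · have hnil : (y :: t).filter (fun z => decide (z.1 = j)) = [] := by
          rw [List.filter_eq_nil_iff]
          intro z hz
          have : y.1 ≤ z.1 := by
            rcases List.mem_cons.mp hz with he | hz
            · exact he ▸ le_refl _
            · exact (List.pairwise_cons.mp hp).1 z hz
          simp only [decide_eq_true_eq]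
          omega
        rw [List.filter_cons_of_pos (by simp [hx]), if_pos hx, hnil]
        rfl
      · rw [List.filter_cons_of_neg (by simp [hx]), if_neg hx]
    · rw [if_neg (by simpa using hb)]
      have ht := ih (List.pairwise_cons.mp hp).2
      by_cases hy : y.1 = j
      · rw [List.filter_cons_of_pos (by simp [hy]), ht]
        by_cases hx : x.1 = j <;> simp [hy, hx]
      · rw [List.filter_cons_of_neg (by simp [hy]), ht]
        by_cases hx : x.1 = j <;> simp [hy, hx]

theorem pvFilterFoldl (j : Int) (P : List (Int × Int)) : ∀ (acc : List (Int × Int)),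
    acc.Pairwise (fun a b => a.1 ≤ b.1) →
    ((P.foldl (fun acc x => PySem.List.insertBy (fun a b => decide (a.1 < b.1)) x acc) acc).filter
        (fun y => decide (y.1 = j)))
    = acc.filter (fun y => decide (y.1 = j)) ++ P.filter (fun y => decide (y.1 = j)) := by
  induction P with
  | nil => intro acc _; simp
  | cons p t ih =>
    intro acc hp
    simp only [List.foldl_cons]
    rw [ih _ (PySem.List.insertBy_pairwise_le (fun q => q.1) p acc hp),
      pvFilterInsertBy j p acc hp]
    by_cases hj : p.1 = j <;> simp [List.filter, hj]

theorem pvFirstValFilter (j : Int) : ∀ (S : List (Int × Int)),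
    pvFirstVal j S = ((S.filter (fun y => decide (y.1 = j))).head?).map Prod.snd := by
  intro S
  induction S with
  | nil => rfl
  | cons p t ih =>
    by_cases hp : p.1 = j <;> simp [pvFirstVal, List.filter, hp, ih]

theorem pvFirstValSorted (j : Int) (P : List (Int × Int)) :
    pvFirstVal j (PySem.List.sorted P (fun p => p.1)) = pvFirstVal j P := by
  rw [pvFirstValFilter, pvFirstValFilter, PySem.List.sorted_eq_foldl_insertBy]
  rw [pvFilterFoldl j P [] (by simp)]
  simp

theorem pvDdFold (t : List (Int × Int)) : ∀ (acc : List (Int × Int)) (q : Int × Int),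
    acc.getLast? = some q → t.foldl pvDdStep acc = acc ++ pvDdAux q.1 t := by
  induction t with
  | nil => intro acc q _; simp [pvDdAux]
  | cons p t ih =>
    intro acc q hq
    rw [List.foldl_cons]
    have hstep : pvDdStep acc p = if p.1 = q.1 then acc else acc ++ [p] := by
      simp only [pvDdStep, hq]
      by_cases hne : p.1 = q.1 <;> simp [hne]
    rw [hstep]
    by_cases hne : p.1 = q.1
    · rw [if_pos hne, ih acc q hq]
      simp only [pvDdAux, if_pos hne]
    · rw [if_neg hne, ih (acc ++ [p]) p (by simp)]
      simp only [pvDdAux, if_neg hne]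
      simp

theorem pvDdAuxMem (S : List (Int × Int)) : ∀ (prev : Int) (x : Int × Int),
    S.Pairwise (fun a b => a.1 ≤ b.1) → (∀ y ∈ S, prev ≤ y.1) →
    (x ∈ pvDdAux prev S ↔ x.1 ≠ prev ∧ pvFirstVal x.1 S = some x.2) := by
  induction S with
  | nil => intro prev x _ _; simp [pvDdAux, pvFirstVal]
  | cons p t ih =>
    intro prev x hp hge
    have hpt := (List.pairwise_cons.mp hp).1
    have htp := (List.pairwise_cons.mp hp).2
    by_cases hpp : p.1 = prev
    · rw [pvDdAux, if_pos hpp]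
      rw [ih prev x htp (fun y hy => hpp ▸ hpt y hy)]
      constructor
      · rintro ⟨hne, hv⟩
        refine ⟨hne, ?_⟩
        rw [pvFirstVal, if_neg (by rw [hpp]; exact fun h => hne h.symm)]
        exact hv
      · rintro ⟨hne, hv⟩
        rw [pvFirstVal, if_neg (by rw [hpp]; exact fun h => hne h.symm)] at hv
        exact ⟨hne, hv⟩
    · rw [pvDdAux, if_neg hpp]
      have hprevlt : prev < p.1 := lt_of_le_of_ne (hge p (by simp)) (fun h => hpp h.symm)
      constructor
      · intro hmem
        rcases List.mem_cons.mp hmem with he | hmem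
        · subst he
          exact ⟨by omega, by rw [pvFirstVal, if_pos rfl]⟩
        · obtain ⟨hne, hv⟩ := (ih p.1 x htp hpt).mp hmem
          have hxmem : (x.1, x.2) ∈ t := pvFirstVal_mem hv
          have : p.1 ≤ x.1 := by
            have := hpt (x.1, x.2) hxmem
            simpa using this
          refine ⟨by omega, ?_⟩
          rw [pvFirstVal, if_neg (fun h => hne h.symm)]
          exact hv
      · rintro ⟨hne, hv⟩
        by_cases hx : x.1 = p.1
        · rw [pvFirstVal, if_pos hx.symm] at hv
          simp only [Option.some_inj] at hv
          exact List.mem_cons.mpr (Or.inl (Prod.ext hx hv.symm))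
        · rw [pvFirstVal, if_neg (fun h => hx h.symm)] at hv
          exact List.mem_cons.mpr (Or.inr ((ih p.1 x htp hpt).mpr ⟨fun h => hx h, hv⟩))

theorem pvDdAuxPairwise (S : List (Int × Int)) : ∀ (prev : Int),
    S.Pairwise (fun a b => a.1 ≤ b.1) → (∀ y ∈ S, prev ≤ y.1) →
    (pvDdAux prev S).Pairwise (fun a b => a.1 < b.1) ∧ (∀ y ∈ pvDdAux prev S, prev < y.1) := by
  induction S with
  | nil => intro prev _ _; simp [pvDdAux]
  | cons p t ih =>
    intro prev hp hge
    have hpt := (List.pairwise_cons.mp hp).1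
    have htp := (List.pairwise_cons.mp hp).2
    by_cases hpp : p.1 = prev
    · rw [pvDdAux, if_pos hpp]
      exact ih prev htp (fun y hy => hpp ▸ hpt y hy)
    · rw [pvDdAux, if_neg hpp]
      have hprevlt : prev < p.1 := lt_of_le_of_ne (hge p (by simp)) (fun h => hpp h.symm)
      obtain ⟨hpw, hbd⟩ := ih p.1 htp hpt
      refine ⟨List.pairwise_cons.mpr ⟨hbd, hpw⟩, ?_⟩
      intro y hy
      rcases List.mem_cons.mp hy with he | hy
      · subst he; exact hprevlt
      · have := hbd y hy; omega

theorem pvDdMem (S : List (Int × Int)) (h : S.Pairwise (fun a b => a.1 ≤ b.1)) (x : Int × Int) :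
    x ∈ S.foldl pvDdStep [] ↔ pvFirstVal x.1 S = some x.2 := by
  cases S with
  | nil => simp [pvFirstVal]
  | cons p t =>
    have hpt := (List.pairwise_cons.mp h).1
    have htp := (List.pairwise_cons.mp h).2
    have h1 : (p :: t).foldl pvDdStep [] = [p] ++ pvDdAux p.1 t := by
      rw [List.foldl_cons]
      show t.foldl pvDdStep [p] = _
      exact pvDdFold t [p] p (by simp)
    rw [h1]
    simp only [List.mem_append, List.mem_singleton]
    rw [pvDdAuxMem t p.1 x htp hpt]
    by_cases hx : x.1 = p.1
    · rw [pvFirstVal, if_pos hx.symm]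
      constructor
      · rintro (he | ⟨hne, _⟩)
        · subst he; rfl
        · exact absurd hx hne
      · intro hv
        simp only [Option.some_inj] at hv
        exact Or.inl (Prod.ext hx hv.symm)
    · rw [pvFirstVal, if_neg (fun h => hx h.symm)]
      constructor
      · rintro (he | ⟨_, hv⟩)
        · exact absurd (congrArg Prod.fst he) hx
        · exact hv
      · intro hv; exact Or.inr ⟨hx, hv⟩

theorem pvDdPairwise (S : List (Int × Int)) (h : S.Pairwise (fun a b => a.1 ≤ b.1)) :
    (S.foldl pvDdStep []).Pairwise (fun a b => a.1 < b.1) := by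
  cases S with
  | nil => simp
  | cons p t =>
    have hpt := (List.pairwise_cons.mp h).1
    have htp := (List.pairwise_cons.mp h).2
    have h1 : (p :: t).foldl pvDdStep [] = [p] ++ pvDdAux p.1 t := by
      rw [List.foldl_cons]
      show t.foldl pvDdStep [p] = _
      exact pvDdFold t [p] p (by simp)
    rw [h1]
    obtain ⟨hpw, hbd⟩ := pvDdAuxPairwise t p.1 htp hpt
    exact List.pairwise_cons.mpr ⟨fun y hy => hbd y hy, hpw⟩

-- the heart of the equivalence: A's sorted dict items = B's dedup of the stable sort
theorem pvCore (zs : List (List Int × List Int)) :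
    PySem.List.sorted2
      ((zs.foldl
        (fun m pr =>
          (PySem.List.enumerate pr.1).foldl
            (fun m iv => if m.contains iv.2 then m else m.insert iv.2 (PySem.List.pyGetD pr.2 iv.1 0)) m)
        PySem.Dict.empty : PySem.Dict Int Int).items) (fun p => p.1) (fun p => p.2)
    = (PySem.List.sorted
        (zs.foldl
          (fun acc pr => acc ++ (PySem.List.enumerate pr.1).map
              (fun iv => (iv.2, PySem.List.pyGetD pr.2 iv.1 0))) [])
        (fun p => p.1)).foldl pvDdStep [] := by
  rw [pvNestA, pvNestB]
  set P := pvPairs zs with hP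
  have hitems : ((P.foldl (fun m p => if m.contains p.1 then m else m.insert p.1 p.2)
      (PySem.Dict.empty : PySem.Dict Int Int)).items) = P.foldl pvDfStep [] := by
    rw [pvDictItems]; rfl
  rw [hitems]
  have hnodup : ((P.foldl pvDfStep []).map Prod.fst).Nodup := pvDfNodup P [] (by simp)
  rw [pvSorted2EqSorted _ hnodup]
  -- both sides are sorted-by-key rearrangements of the same deduped pair set
  have hsortedP := PySem.List.sorted_pairwise P (fun p => p.1)
  apply PySem.List.sorted_eq_of_perm_of_pairwise_lt
  · -- Perm
    rw [List.perm_ext_iff_of_nodup]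
    · intro x
      rw [pvDdMem _ hsortedP x, pvFirstValSorted, pvDfMem]
      simp
    · have hpw := pvDdPairwise _ hsortedP
      have hne : ((PySem.List.sorted P (fun p => p.1)).foldl pvDdStep []).Pairwise (fun a b => a ≠ b) :=
        hpw.imp (fun {a b} (h : a.1 < b.1) (he : a = b) => absurd (he ▸ h) (lt_irrefl _))
      exact hne
    · exact hnodup.of_map
  · exact pvDdPairwise _ hsortedP

-- ===== VERDICT (by name: the statement is the Claim_ definition above) =====
theorem get_jobs_cpus_spec : Claim_equal_get_jobs_cpus := by
  intro row item _ hpre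
  unfold Spec_get_jobs_cpus
  unfold Pre_get_jobs_cpus pvPreB at hpre
  unfold get_jobs_cpus get_jobs_cpus_alt
  cases hj : (PySem.Dict.mk row).get? "jobs_copy" with
  | none => rw [hj] at hpre; simp at hpre
  | some jcv =>
    rw [hj] at hpre
    cases jcv with
    | none =>
      by_cases h1 : item = "jobs" <;> by_cases h2 : item = "cpus" <;>
        simp [pvTailA, h1, h2]
    | some jc =>
      by_cases he : jc.isEmpty
      · have he' : jc = [] := by simpa using he
        subst he'
        by_cases h1 : item = "jobs" <;> by_cases h2 : item = "cpus" <;>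
          simp [pvTailA, h1, h2]
      · cases hc : (PySem.Dict.mk row).get? "cpus" with
        | none => rw [hc] at hpre; simp [he] at hpre
        | some cpv =>
          rw [hc] at hpre
          cases cpv with
          | none => simp [he] at hpre
          | some cp =>
            have hcore := pvCore (jc.zip cp)
            have he' : ¬ jc = [] := by simpa using he
            by_cases h1 : item = "jobs" <;> by_cases h2 : item = "cpus" <;>
              simp [pvTailA, he, he', h1, h2, hcore]
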